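-- pv_equiv track=rewrite | github.com/Ambitiousaman/delivery-cost-api | app.py | calculate_center_requirements
-- ===== SOURCE A (Python) =====
-- CENTERS = {
--     'C1': ['A', 'B', 'C'],
--     'C2': ['D', 'E', 'F'],
--     'C3': ['G', 'H', 'I']
-- }
--
-- def calculate_center_requirements(order):
--     center_needs = {'C1': False, 'C2': False, 'C3': False}
--     for product, quantity in order.items():
--         if quantity > 0:
--             if product in CENTERS['C1']:
--                 center_needs['C1'] = True
--             elif product in CENTERS['C2']:
--                 center_needs['C2'] = True
--             elif product in CENTERS['C3']:
--                 center_needs['C3'] = True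
--     return center_needs
-- ===== SOURCE B (Python) =====
-- CENTERS = {
--     'C1': ['A', 'B', 'C'],
--     'C2': ['D', 'E', 'F'],
--     'C3': ['G', 'H', 'I']
-- }
--
-- def calculate_center_requirements(order):
--     return {c: any(order.get(p, 0) > 0 for p in products)
--             for c, products in CENTERS.items()}
-- ===== Notes on version B (the rewrite author's own statement) =====
-- stated objective: simpler
-- what changed: B builds the result by iterating over the fixed CENTERS mapping and flagging each center with any(order.get(p,0) > 0 for its products) — 9 O(1) dict lookups instead of A's per-item elif chain of list-membership tests; Pre_ excludes association lists with duplicate keys, which cannot represent a Python dict input.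
import Mathlib
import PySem

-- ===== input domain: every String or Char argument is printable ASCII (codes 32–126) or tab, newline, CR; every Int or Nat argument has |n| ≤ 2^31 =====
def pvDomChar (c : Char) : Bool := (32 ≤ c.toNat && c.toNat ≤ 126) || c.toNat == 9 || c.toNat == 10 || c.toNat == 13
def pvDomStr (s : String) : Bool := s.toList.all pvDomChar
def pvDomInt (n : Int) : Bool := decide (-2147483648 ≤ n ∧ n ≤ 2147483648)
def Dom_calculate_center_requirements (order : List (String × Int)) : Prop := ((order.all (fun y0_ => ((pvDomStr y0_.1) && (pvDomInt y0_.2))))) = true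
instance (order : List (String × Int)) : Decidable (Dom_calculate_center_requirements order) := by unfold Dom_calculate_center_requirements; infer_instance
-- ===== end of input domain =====

-- B iterates over the fixed CENTERS table querying the order dict, instead of A's scan of the
-- order with an elif chain of membership tests; simpler, and constant work per center.

-- ===== PORT A =====
-- CENTERS = {'C1': ['A','B','C'], 'C2': ['D','E','F'], 'C3': ['G','H','I']}
-- loop body of A, lifted to a named helper
def pvStepA (d : PySem.Dict String Bool) (pq : String × Int) : PySem.Dict String Bool :=
  if pq.2 > 0 then
    if ["A","B","C"].contains pq.1 then d.insert "C1" true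
    else if ["D","E","F"].contains pq.1 then d.insert "C2" true
    else if ["G","H","I"].contains pq.1 then d.insert "C3" true
    else d
  else d

def calculate_center_requirements (order : List (String × Int)) : List (String × Bool) :=
  (order.foldl pvStepA (PySem.Dict.mk [("C1", false), ("C2", false), ("C3", false)])).items

-- ===== PORT B =====
-- the module constant CENTERS, as the association list B iterates over
def pvCENTERS : List (String × List String) :=
  [("C1", ["A","B","C"]), ("C2", ["D","E","F"]), ("C3", ["G","H","I"])]

def calculate_center_requirements_alt (order : List (String × Int)) : List (String × Bool) :=
  pvCENTERS.map (fun cp =>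
    (cp.1, cp.2.any (fun p => decide ((PySem.Dict.mk order).getD p 0 > 0))))

-- ===== PRECONDITION & SPEC =====
-- Pre_ excludes association lists with duplicate keys: a Python dict cannot contain them, so they
-- represent no input of A; on such lists A's port reads every entry while B's reads the first match.
def Pre_calculate_center_requirements (order : List (String × Int)) : Prop :=
  (order.map Prod.fst).Nodup
instance (order : List (String × Int)) : Decidable (Pre_calculate_center_requirements order) := by
  unfold Pre_calculate_center_requirements; infer_instance

def pvWitness_calculate_center_requirements : (List (String × Int)) := [("A", 2), ("D", 0), ("x", 1)]

def Spec_calculate_center_requirements (order : List (String × Int)) (out : List (String × Bool)) : Prop := out = calculate_center_requirements_alt order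
instance (order : List (String × Int)) (out : List (String × Bool)) : Decidable (Spec_calculate_center_requirements order out) := by unfold Spec_calculate_center_requirements; infer_instance

-- ===== CLAIM (what is proved, stated in full; the proofs are below) =====
def Claim_equal_calculate_center_requirements : Prop := ∀ (order : List (String × Int)), Dom_calculate_center_requirements order → Pre_calculate_center_requirements order → Spec_calculate_center_requirements order (calculate_center_requirements order)

-- ===== LEMMAS AND PROOFS =====
def pvG1 (pq : String × Int) : Bool := pq.2 > 0 && ["A","B","C"].contains pq.1
def pvG2 (pq : String × Int) : Bool := pq.2 > 0 && ["D","E","F"].contains pq.1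
def pvG3 (pq : String × Int) : Bool := pq.2 > 0 && ["G","H","I"].contains pq.1

-- characterisation of A's loop: each flag is an `any` over the processed entries
lemma pvLoopA (l : List (String × Int)) (b1 b2 b3 : Bool) :
    l.foldl pvStepA (PySem.Dict.mk [("C1", b1), ("C2", b2), ("C3", b3)]) =
      PySem.Dict.mk [("C1", b1 || l.any pvG1), ("C2", b2 || l.any pvG2), ("C3", b3 || l.any pvG3)] := by
  induction l generalizing b1 b2 b3 with
  | nil => simp
  | cons pq rest ih =>
    rcases pq with ⟨p, q⟩
    simp only [List.foldl_cons, List.any_cons, pvStepA]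
    by_cases h : q > 0
    · by_cases h1 : p ∈ ["A","B","C"]
      · simp only [List.mem_cons, List.not_mem_nil, or_false] at h1
        rcases h1 with rfl | rfl | rfl <;>
          simp [ih, pvG1, pvG2, pvG3, h, PySem.Dict.insert, PySem.Dict.contains]
      · by_cases h2 : p ∈ ["D","E","F"]
        · simp only [List.mem_cons, List.not_mem_nil, or_false] at h2
          rcases h2 with rfl | rfl | rfl <;>
            simp [ih, pvG1, pvG2, pvG3, h, PySem.Dict.insert, PySem.Dict.contains]
        · by_cases h3 : p ∈ ["G","H","I"]
          · simp only [List.mem_cons, List.not_mem_nil, or_false] at h3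
            rcases h3 with rfl | rfl | rfl <;>
              simp [ih, pvG1, pvG2, pvG3, h, PySem.Dict.insert, PySem.Dict.contains]
          · simp only [List.mem_cons, List.not_mem_nil, or_false, not_or] at h1 h2 h3
            simp [ih, pvG1, pvG2, pvG3, h, h1.1, h1.2.1, h1.2.2, h2.1, h2.2.1, h2.2.2,
              h3.1, h3.2.1, h3.2.2]
    · simp [ih, pvG1, pvG2, pvG3, h]

-- with distinct keys, B's positive-lookup test is an `any` over the entries with that key
lemma pvAnyKey (order : List (String × Int)) (hnd : (order.map Prod.fst).Nodup) (x : String) :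
    decide ((PySem.Dict.mk order).getD x 0 > 0) =
      order.any (fun pq => decide (pq.2 > 0) && (pq.1 == x)) := by
  induction order with
  | nil => simp [PySem.Dict.getD, PySem.Dict.get?]
  | cons pq rest ih =>
    rcases pq with ⟨p, q⟩
    simp only [List.map_cons, List.nodup_cons] at hnd
    rw [PySem.Dict.getD_eq_get?_getD, PySem.Dict.get?_mk_cons]
    by_cases hpx : p = x
    · subst hpx
      have hrest : rest.any (fun pq => decide (pq.2 > 0) && (pq.1 == p)) = false := by
        rw [List.any_eq_false]
        intro a ha
        have : a.1 ≠ p := fun h => hnd.1 (h ▸ List.mem_map_of_mem ha)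
        simp [this]
      simp [hrest]
    · have : (p == x) = false := by simp [hpx]
      simp only [this, Bool.false_eq_true, if_false]
      rw [← PySem.Dict.getD_eq_get?_getD, ih hnd.2, List.any_cons]
      simp [this]

lemma pvAnyOr {α : Type} (l : List α) (f g : α → Bool) :
    l.any (fun x => f x || g x) = (l.any f || l.any g) := by
  induction l with
  | nil => rfl
  | cons a t ih =>
    simp only [List.any_cons, ih]
    cases f a <;> cases g a <;> simp

-- ===== VERDICT (by name: the statement is the Claim_ definition above) =====
theorem calculate_center_requirements_spec : Claim_equal_calculate_center_requirements := by
  intro order _ hnd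
  unfold Spec_calculate_center_requirements
  unfold calculate_center_requirements calculate_center_requirements_alt pvCENTERS
  rw [pvLoopA]
  simp only [List.map_cons, List.map_nil, List.any_cons, List.any_nil,
    Bool.false_or, Bool.or_false]
  rw [pvAnyKey order hnd "A", pvAnyKey order hnd "B", pvAnyKey order hnd "C",
      pvAnyKey order hnd "D", pvAnyKey order hnd "E", pvAnyKey order hnd "F",
      pvAnyKey order hnd "G", pvAnyKey order hnd "H", pvAnyKey order hnd "I"]
  simp only [← pvAnyOr]
  simp only [List.cons.injEq, Prod.mk.injEq, and_true, true_and]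
  refine ⟨?_, ?_, ?_⟩ <;>
    · refine List.any_congr rfl (fun pq => ?_)
      simp [pvG1, pvG2, pvG3, Bool.and_or_distrib_left, beq_eq_decide]
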